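-- pv_equiv track=rewrite | github.com/danielgraviet/LeetCode | number_to_numeral/sol.py | extract_places
-- ===== SOURCE A (Python) =====
-- def extract_places(number):
--     place_values = []
--     place = 1
--
--     while number > 0:
--         digit = number % 10
--         place_values.append(digit * place)
--         number //= 10
--         place *= 10
--
--     return place_values[::-1]
-- ===== SOURCE B (Python) =====
-- def extract_places(number):
--     n = number
--     d = 0
--     while n > 0:
--         n //= 10
--         d += 1
--     return [(number // 10 ** i) % 10 * 10 ** i for i in range(d - 1, -1, -1)]
-- ===== Notes on version B (the rewrite author's own statement) =====
-- stated objective: idiomatic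
-- what changed: B counts the digits first, then builds the list most-significant-first with a direct place-value formula, so there is no accumulator of running place values and no final reversal.
import Mathlib
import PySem

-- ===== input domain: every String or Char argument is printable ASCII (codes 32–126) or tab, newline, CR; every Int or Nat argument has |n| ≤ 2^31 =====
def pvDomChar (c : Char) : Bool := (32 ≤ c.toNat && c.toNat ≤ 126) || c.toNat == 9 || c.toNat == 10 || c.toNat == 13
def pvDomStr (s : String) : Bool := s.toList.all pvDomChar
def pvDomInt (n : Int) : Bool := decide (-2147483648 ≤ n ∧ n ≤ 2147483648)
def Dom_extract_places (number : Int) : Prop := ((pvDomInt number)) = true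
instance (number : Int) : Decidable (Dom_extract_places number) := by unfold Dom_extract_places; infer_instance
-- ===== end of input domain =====

-- B counts the digits first, then builds the list most-significant-first by a place-value
-- formula, with no running accumulator and no final reversal (objective: idiomatic).

-- ===== PORT A =====
-- while number > 0: append (number % 10) * place; number //= 10; place *= 10
def extract_places_loop (number place : Int) (acc : List Int) : List Int :=
  if _h : 0 < number then
    extract_places_loop (PySem.Int.floordiv number 10) (place * 10)
      (acc ++ [PySem.Int.mod number 10 * place])
  else acc
termination_by number.toNat
decreasing_by
  rw [PySem.Int.floordiv_eq_ediv_of_pos (by norm_num : (0:Int) < 10)]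
  omega

-- place_values[::-1] (a list [::-1] slice is exactly List.reverse)
def extract_places (number : Int) : List Int :=
  (extract_places_loop number 1 []).reverse

-- ===== PORT B =====
-- while n > 0: n //= 10; d += 1
def count_digits_loop (n : Int) : Nat :=
  if _h : 0 < n then count_digits_loop (PySem.Int.floordiv n 10) + 1 else 0
termination_by n.toNat
decreasing_by
  rw [PySem.Int.floordiv_eq_ediv_of_pos (by norm_num : (0:Int) < 10)]
  omega

-- [(number // 10**i) % 10 * 10**i for i in range(d-1, -1, -1)]
-- (range(d-1,-1,-1) over the naturals 0..d-1 is exactly (List.range d).reverse)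
def extract_places_alt (number : Int) : List Int :=
  (List.range (count_digits_loop number)).reverse.map
    (fun i => PySem.Int.mod (PySem.Int.floordiv number (10 ^ i)) 10 * 10 ^ i)

-- ===== PRECONDITION & SPEC =====
def Spec_extract_places (number : Int) (out : List Int) : Prop := out = extract_places_alt number
instance (number : Int) (out : List Int) : Decidable (Spec_extract_places number out) := by unfold Spec_extract_places; infer_instance

-- ===== CLAIM (what is proved, stated in full; the proofs are below) =====
def Claim_equal_extract_places : Prop := ∀ (number : Int), Dom_extract_places number → Spec_extract_places number (extract_places number)

-- ===== LEMMAS AND PROOFS =====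

lemma extract_places_loop_acc (k : Nat) :
    ∀ (n p : Int) (acc : List Int), n.toNat ≤ k →
      extract_places_loop n p acc = acc ++ extract_places_loop n p [] := by
  induction k with
  | zero =>
    intro n p acc hn
    have h : ¬ 0 < n := by omega
    conv_lhs => rw [extract_places_loop]
    conv_rhs => rw [extract_places_loop]
    simp [h]
  | succ k ih =>
    intro n p acc hn
    by_cases h : 0 < n
    · conv_lhs => rw [extract_places_loop]
      conv_rhs => rw [extract_places_loop]
      simp only [h, dif_pos, List.nil_append]
      have hd : (PySem.Int.floordiv n 10).toNat ≤ k := by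
        rw [PySem.Int.floordiv_eq_ediv_of_pos (by norm_num : (0:Int) < 10)]
        omega
      rw [ih _ _ _ hd, ih _ _ [PySem.Int.mod n 10 * p] hd]
      simp
    · conv_lhs => rw [extract_places_loop]
      conv_rhs => rw [extract_places_loop]
      simp [h]

lemma extract_places_loop_eq (k : Nat) :
    ∀ (n p : Int), n.toNat ≤ k →
      extract_places_loop n p [] =
        (List.range (count_digits_loop n)).map
          (fun i => PySem.Int.mod (PySem.Int.floordiv n (10 ^ i)) 10 * (p * 10 ^ i)) := by
  induction k with
  | zero =>
    intro n p hn
    have h : ¬ 0 < n := by omega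
    conv_lhs => rw [extract_places_loop]
    conv_rhs => rw [count_digits_loop]
    simp [h]
  | succ k ih =>
    intro n p hn
    by_cases h : 0 < n
    · have hed : PySem.Int.floordiv n 10 = n / 10 :=
        PySem.Int.floordiv_eq_ediv_of_pos (by norm_num)
      have hd : (PySem.Int.floordiv n 10).toNat ≤ k := by rw [hed]; omega
      conv_lhs => rw [extract_places_loop]
      simp only [h, dif_pos, List.nil_append]
      rw [extract_places_loop_acc k _ _ _ hd, ih _ (p * 10) hd]
      conv_rhs => rw [count_digits_loop]
      simp only [h, dif_pos, List.range_succ_eq_map, List.map_cons, List.map_map,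
        List.singleton_append]
      congr 1
      · rw [pow_zero, PySem.Int.floordiv_eq_ediv_of_pos (by norm_num : (0:Int) < 1),
          Int.ediv_one, mul_one]
      · apply List.map_congr_left
        intro i _
        simp only [Function.comp]
        have h10 : PySem.Int.floordiv (PySem.Int.floordiv n 10) (10 ^ i) =
            PySem.Int.floordiv n (10 ^ (i + 1)) := by
          rw [hed,
            PySem.Int.floordiv_eq_ediv_of_pos (b := (10:Int) ^ i) (by positivity),
            PySem.Int.floordiv_eq_ediv_of_pos (b := (10:Int) ^ (i + 1)) (by positivity),
            Int.ediv_ediv_of_nonneg (by norm_num), pow_succ]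
          ring_nf
        rw [h10, pow_succ]
        ring
    · conv_lhs => rw [extract_places_loop]
      conv_rhs => rw [count_digits_loop]
      simp [h]

-- ===== VERDICT (by name: the statement is the Claim_ definition above) =====
theorem extract_places_spec : Claim_equal_extract_places := by
  intro number _
  unfold Spec_extract_places extract_places extract_places_alt
  rw [extract_places_loop_eq number.toNat number 1 le_rfl]
  rw [← List.map_reverse]
  simp
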